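-- pv_equiv track=rewrite | github.com/buzhengjing/God-of-Automation | skills/flagos-operator-replacement/operator_optimizer.py | classify_ops
-- ===== SOURCE A (Python) =====
-- from typing import Any, Dict, List, Optional, Set
--
-- OPERATOR_GROUPS = {
--     "compute": [
--         "addmm", "mm", "bmm", "linear", "matmul",
--         "conv2d", "conv_depthwise2d",
--     ],
--     "memory": [
--         "copy_", "zero_", "zeros", "ones", "ones_like", "full", "fill_scalar_",
--         "clone", "to_copy", "empty_like", "new_zeros", "new_ones",
--     ],
--     "math": [
--         "cos", "sin", "pow_scalar", "reciprocal", "exp", "log", "sqrt", "rsqrt",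
--         "abs", "neg", "tanh", "sigmoid", "gelu", "silu", "relu",
--         "add", "sub", "mul", "div", "add_scalar", "sub_scalar", "mul_scalar",
--         "div_scalar",
--     ],
--     "index": [
--         "gather", "scatter", "scatter_add_0", "index", "index_select",
--         "embedding", "slice_scatter", "select_scatter",
--     ],
--     "reduce": [
--         "cumsum", "sort", "sort_stable", "argmax", "arange_start",
--         "sum", "mean", "max", "min", "softmax", "log_softmax",
--         "layer_norm", "rms_norm", "group_norm",
--     ],
-- }
--
-- def classify_ops(ops: List[str]) -> Dict[str, List[str]]:
--     """将算子按功能分组，未归类的放入 'other'"""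
--     classified = {group: [] for group in OPERATOR_GROUPS}
--     classified["other"] = []
--
--     known_ops: Set[str] = set()
--     for group_ops in OPERATOR_GROUPS.values():
--         known_ops.update(group_ops)
--
--     for op in ops:
--         placed = False
--         for group_name, group_ops in OPERATOR_GROUPS.items():
--             if op in group_ops:
--                 classified[group_name].append(op)
--                 placed = True
--                 break
--         if not placed:
--             classified["other"].append(op)
--
--     # 移除空组
--     return {k: v for k, v in classified.items() if v}
-- ===== SOURCE B (Python) =====
-- from typing import Dict, List
--
-- OPERATOR_GROUPS = {
--     "compute": [
--         "addmm", "mm", "bmm", "linear", "matmul",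
--         "conv2d", "conv_depthwise2d",
--     ],
--     "memory": [
--         "copy_", "zero_", "zeros", "ones", "ones_like", "full", "fill_scalar_",
--         "clone", "to_copy", "empty_like", "new_zeros", "new_ones",
--     ],
--     "math": [
--         "cos", "sin", "pow_scalar", "reciprocal", "exp", "log", "sqrt", "rsqrt",
--         "abs", "neg", "tanh", "sigmoid", "gelu", "silu", "relu",
--         "add", "sub", "mul", "div", "add_scalar", "sub_scalar", "mul_scalar",
--         "div_scalar",
--     ],
--     "index": [
--         "gather", "scatter", "scatter_add_0", "index", "index_select",
--         "embedding", "slice_scatter", "select_scatter",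
--     ],
--     "reduce": [
--         "cumsum", "sort", "sort_stable", "argmax", "arange_start",
--         "sum", "mean", "max", "min", "softmax", "log_softmax",
--         "layer_norm", "rms_norm", "group_norm",
--     ],
-- }
--
-- # op name -> group name, first group wins
-- _LOOKUP: Dict[str, str] = {}
-- for _g, _names in OPERATOR_GROUPS.items():
--     for _n in _names:
--         _LOOKUP.setdefault(_n, _g)
--
-- def classify_ops(ops: List[str]) -> Dict[str, List[str]]:
--     """Group ops by function via a precomputed lookup; unclassified go to 'other'."""
--     result = {group: [] for group in OPERATOR_GROUPS}
--     result["other"] = []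
--     for op in ops:
--         result[_LOOKUP.get(op, "other")].append(op)
--     return {k: v for k, v in result.items() if v}
-- ===== Notes on version B (the rewrite author's own statement) =====
-- stated objective: faster
-- what changed: Replaced the per-op scan over all groups' lists with a precomputed op->group lookup dict (setdefault keeps first-match-wins), so classification is one hash lookup per op instead of repeated list membership scans.
import Mathlib
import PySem

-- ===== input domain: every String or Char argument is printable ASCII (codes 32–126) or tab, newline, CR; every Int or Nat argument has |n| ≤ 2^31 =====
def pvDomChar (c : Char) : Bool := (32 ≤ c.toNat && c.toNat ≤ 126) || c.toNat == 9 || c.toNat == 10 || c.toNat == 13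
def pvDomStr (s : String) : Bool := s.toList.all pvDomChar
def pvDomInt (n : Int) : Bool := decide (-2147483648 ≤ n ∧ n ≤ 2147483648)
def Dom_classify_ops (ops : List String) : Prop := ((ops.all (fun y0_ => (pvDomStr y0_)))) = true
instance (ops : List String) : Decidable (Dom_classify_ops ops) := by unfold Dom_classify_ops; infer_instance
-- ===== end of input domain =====

-- ===== PORT A =====
-- B precomputes an op->group lookup dict so each op is classified by one lookup
-- instead of scanning every group's list; same return value as A.

def OPERATOR_GROUPS : PySem.Dict String (List String) := PySem.Dict.ofList [
  ("compute", ["addmm", "mm", "bmm", "linear", "matmul",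
    "conv2d", "conv_depthwise2d"]),
  ("memory", ["copy_", "zero_", "zeros", "ones", "ones_like", "full", "fill_scalar_",
    "clone", "to_copy", "empty_like", "new_zeros", "new_ones"]),
  ("math", ["cos", "sin", "pow_scalar", "reciprocal", "exp", "log", "sqrt", "rsqrt",
    "abs", "neg", "tanh", "sigmoid", "gelu", "silu", "relu",
    "add", "sub", "mul", "div", "add_scalar", "sub_scalar", "mul_scalar",
    "div_scalar"]),
  ("index", ["gather", "scatter", "scatter_add_0", "index", "index_select",
    "embedding", "slice_scatter", "select_scatter"]),
  ("reduce", ["cumsum", "sort", "sort_stable", "argmax", "arange_start",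
    "sum", "mean", "max", "min", "softmax", "log_softmax",
    "layer_norm", "rms_norm", "group_norm"])]

-- inner 'for group_name, group_ops in OPERATOR_GROUPS.items(): if op in group_ops: append, placed=True, break'
def placeLoopA (gs : List (String × List String)) (op : String)
    (cl : PySem.Dict String (List String)) : PySem.Dict String (List String) × Bool :=
  match gs with
  | [] => (cl, false)
  | (g, gl) :: rest =>
      if op ∈ gl then (cl.modify g [] (fun v => v ++ [op]), true)
      else placeLoopA rest op cl

def classify_ops (ops : List String) : List (String × List String) :=
  let classified : PySem.Dict String (List String) :=
    (OPERATOR_GROUPS.keys.foldl (fun d g => d.insert g ([] : List String)) PySem.Dict.empty).insert "other" []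
  -- known_ops is built by A but never used afterwards; transliterated all the same
  let _known_ops : PySem.Set String :=
    OPERATOR_GROUPS.values.foldl (fun s l => PySem.Set.update s l) PySem.Set.empty
  let classified := ops.foldl (fun cl op =>
      let pr := placeLoopA OPERATOR_GROUPS.items op cl
      if pr.2 then pr.1 else pr.1.modify "other" [] (fun v => v ++ [op])) classified
  classified.items.filter (fun kv => !kv.2.isEmpty)

-- ===== PORT B =====
-- _LOOKUP: op name -> group name, built once with setdefault (first group wins)
def pvLookup : PySem.Dict String String :=
  OPERATOR_GROUPS.items.foldl
    (fun t p => p.2.foldl (fun t n => t.setdefault n p.1) t) PySem.Dict.empty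

def classify_ops_alt (ops : List String) : List (String × List String) :=
  let result : PySem.Dict String (List String) :=
    (OPERATOR_GROUPS.keys.foldl (fun d g => d.insert g ([] : List String)) PySem.Dict.empty).insert "other" []
  let result := ops.foldl
    (fun d op => d.modify (pvLookup.getD op "other") [] (fun v => v ++ [op])) result
  result.items.filter (fun kv => !kv.2.isEmpty)

-- ===== PRECONDITION & SPEC =====
def Spec_classify_ops (ops : List String) (out : List (String × List String)) : Prop := out = classify_ops_alt ops
instance (ops : List String) (out : List (String × List String)) : Decidable (Spec_classify_ops ops out) := by unfold Spec_classify_ops; infer_instance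

-- ===== CLAIM (what is proved, stated in full; the proofs are below) =====
def Claim_equal_classify_ops : Prop := ∀ (ops : List String), Dom_classify_ops ops → Spec_classify_ops ops (classify_ops ops)

-- ===== LEMMAS AND PROOFS =====

-- the group A's inner scan assigns to op: first group whose list contains op
def scanKey (gs : List (String × List String)) (op : String) : Option String :=
  match gs with
  | [] => none
  | (g, gl) :: rest => if op ∈ gl then some g else scanKey rest op

theorem placeLoopA_eq_scanKey (gs : List (String × List String)) (op : String)
    (cl : PySem.Dict String (List String)) :
    placeLoopA gs op cl =
      match scanKey gs op with
      | some g => (cl.modify g [] (fun v => v ++ [op]), true)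
      | none => (cl, false) := by
  induction gs with
  | nil => rfl
  | cons p rest ih =>
      obtain ⟨g, gl⟩ := p
      simp only [placeLoopA, scanKey]
      split_ifs with h
      · rfl
      · exact ih

theorem setdefault_fold_get? (names : List String) (g : String)
    (t : PySem.Dict String String) (op : String) :
    (names.foldl (fun t n => t.setdefault n g) t).get? op =
      (t.get? op).or (if op ∈ names then some g else none) := by
  induction names generalizing t with
  | nil => simp
  | cons n rest ih =>
      simp only [List.foldl_cons, ih]
      by_cases hc : t.contains n = true
      · rw [PySem.Dict.setdefault_of_contains _ _ hc]
        by_cases hop : op = n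
        · subst hop
          rw [PySem.Dict.contains_eq_isSome_get?] at hc
          cases hg : t.get? op with
          | none => simp [hg] at hc
          | some v => simp
        · simp [hop]
      · rw [PySem.Dict.setdefault_of_not_contains _ _ (by simpa using hc)]
        by_cases hop : op = n
        · subst hop
          rw [PySem.Dict.contains_eq_isSome_get?] at hc
          cases hg : t.get? op with
          | none => simp [PySem.Dict.get?_insert_self]
          | some v => simp [hg] at hc
        · rw [PySem.Dict.get?_insert_of_ne _ _ hop]
          simp [hop]

theorem build_fold_get? (gs : List (String × List String))
    (t : PySem.Dict String String) (op : String) :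
    (gs.foldl (fun t p => p.2.foldl (fun t n => t.setdefault n p.1) t) t).get? op =
      (t.get? op).or (scanKey gs op) := by
  induction gs generalizing t with
  | nil => simp [scanKey]
  | cons p rest ih =>
      obtain ⟨g, gl⟩ := p
      simp only [List.foldl_cons, ih, setdefault_fold_get?, scanKey]
      by_cases h : op ∈ gl <;> cases t.get? op <;> simp [h]

theorem pvLookup_get? (op : String) :
    pvLookup.get? op = scanKey OPERATOR_GROUPS.items op := by
  rw [pvLookup, build_fold_get?]
  simp [PySem.Dict.get?_empty]

theorem key_eq (op : String) :
    (scanKey OPERATOR_GROUPS.items op).getD "other" = pvLookup.getD op "other" := by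
  rw [PySem.Dict.getD_eq_get?_getD, pvLookup_get?]

theorem stepA_eq_stepB (cl : PySem.Dict String (List String)) (op : String) :
    (let pr := placeLoopA OPERATOR_GROUPS.items op cl
     if pr.2 then pr.1 else pr.1.modify "other" [] (fun v => v ++ [op])) =
      cl.modify (pvLookup.getD op "other") [] (fun v => v ++ [op]) := by
  rw [← key_eq op]
  rw [placeLoopA_eq_scanKey]
  cases scanKey OPERATOR_GROUPS.items op <;> simp

-- ===== VERDICT (by name: the statement is the Claim_ definition above) =====
theorem classify_ops_spec : Claim_equal_classify_ops := by
  intro ops _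
  unfold Spec_classify_ops classify_ops classify_ops_alt
  have h : (fun (cl : PySem.Dict String (List String)) (op : String) =>
        let pr := placeLoopA OPERATOR_GROUPS.items op cl
        if pr.2 then pr.1 else pr.1.modify "other" [] (fun v => v ++ [op])) =
      (fun (d : PySem.Dict String (List String)) (op : String) =>
        d.modify (pvLookup.getD op "other") [] (fun v => v ++ [op])) :=
    funext fun cl => funext fun op => stepA_eq_stepB cl op
  rw [h]
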